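-- pv_equiv track=rewrite | github.com/tgy1201/coding-test | 프로그래머스/2/17683. ［3차］ 방금그곡/［3차］ 방금그곡.py | calMusic
-- ===== SOURCE A (Python) =====
-- def calMusic(music):
--     s = []
--     for j in range(0, len(music)):
--         if(music[j] == "#"):
--             continue
--         if(j == len(music) - 1):
--             s.append(music[j])
--             break
--         if(music[j+1] == "#"):
--             s.append(music[j].lower())
--         else:
--             s.append(music[j])
--     return ''.join(s)
-- ===== SOURCE B (Python) =====
-- def calMusic(music):
--     # Single reversed scan carrying a "next char is '#'" flag; no indexing.
--     out = []
--     sharp = False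
--     for c in reversed(music):
--         if c == '#':
--             sharp = True
--         else:
--             out.append(c.lower() if sharp else c)
--             sharp = False
--     return ''.join(reversed(out))
-- ===== Notes on version B (the rewrite author's own statement) =====
-- stated objective: alternative
-- what changed: Replaces A's index loop with lookahead music[j+1], continue and break by a single reversed scan that carries a boolean sharp flag, so no indexing or length arithmetic is needed.
import Mathlib
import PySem

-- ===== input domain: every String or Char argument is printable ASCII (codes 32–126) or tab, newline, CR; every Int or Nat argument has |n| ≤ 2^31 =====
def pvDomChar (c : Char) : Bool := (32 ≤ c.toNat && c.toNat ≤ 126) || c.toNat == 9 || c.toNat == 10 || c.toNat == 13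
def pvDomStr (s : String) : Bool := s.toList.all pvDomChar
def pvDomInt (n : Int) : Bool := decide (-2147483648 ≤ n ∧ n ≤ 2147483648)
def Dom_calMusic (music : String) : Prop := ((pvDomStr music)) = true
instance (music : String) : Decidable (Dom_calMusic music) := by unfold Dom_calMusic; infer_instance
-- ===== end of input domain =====

-- B replaces A's index loop with lookahead by one reversed scan carrying a flag (alternative decomposition, same cost).

-- ===== PORT A =====
-- index loop 'for j in range(0, len(music))' with continue/break, transliterated as
-- recursion on the index j; music[j+1] is only read when j ≠ len-1, so j+1 is in range
-- and the getD default is never returned.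
def calMusicGo (cs : List Char) (j : Nat) (s : List Char) : List Char :=
  if h : j < cs.length then
    if cs[j] = '#' then calMusicGo cs (j+1) s
    else if j = cs.length - 1 then s ++ [cs[j]]      -- append then break
    else if cs.getD (j+1) ' ' = '#' then calMusicGo cs (j+1) (s ++ [PySem.Chars.lowerChar cs[j]])
    else calMusicGo cs (j+1) (s ++ [cs[j]])
  else s
termination_by cs.length - j

def calMusic (music : String) : String :=
  String.ofList (calMusicGo music.toList 0 [])

-- ===== PORT B =====
-- one step of B's loop over reversed(music): state = (sharp flag, out)
def altStep (st : Bool × List Char) (c : Char) : Bool × List Char :=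
  if c = '#' then (true, st.2)
  else (false, st.2 ++ [if st.1 then PySem.Chars.lowerChar c else c])

def calMusic_alt (music : String) : String :=
  String.ofList ((music.toList.reverse.foldl altStep (false, [])).2.reverse)

-- ===== PRECONDITION & SPEC =====
def Spec_calMusic (music : String) (out : String) : Prop := out = calMusic_alt music
instance (music : String) (out : String) : Decidable (Spec_calMusic music out) := by unfold Spec_calMusic; infer_instance

-- ===== CLAIM (what is proved, stated in full; the proofs are below) =====
def Claim_equal_calMusic : Prop := ∀ (music : String), Dom_calMusic music → Spec_calMusic music (calMusic music)

-- ===== LEMMAS AND PROOFS =====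

-- common characterisation: keep each non-'#' character, lowercased iff followed by '#'
def gSpec : List Char → List Char
  | [] => []
  | c :: rest =>
      if c = '#' then gSpec rest
      else (if rest.head? = some '#' then PySem.Chars.lowerChar c else c) :: gSpec rest

theorem altFold (cs : List Char) :
    cs.foldr (fun c st => altStep st c) (false, []) =
      (decide (cs.head? = some '#'), (gSpec cs).reverse) := by
  induction cs with
  | nil => simp [gSpec]
  | cons c rest ih =>
      rw [List.foldr_cons, ih]
      by_cases hc : c = '#' <;> simp [hc, altStep, gSpec]

theorem goDrop (cs : List Char) (j : Nat) (s : List Char) :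
    calMusicGo cs j s = s ++ gSpec (cs.drop j) := by
  by_cases h : j < cs.length
  · have hdrop : cs.drop j = cs[j] :: cs.drop (j+1) := (List.getElem_cons_drop h).symm
    rw [calMusicGo]
    by_cases hc : cs[j] = '#'
    · rw [dif_pos h, if_pos hc, goDrop cs (j+1) s, hdrop]
      simp [gSpec, hc]
    · by_cases hlast : j = cs.length - 1
      · have hnil : cs.drop (j+1) = [] := by
          apply List.drop_eq_nil_of_le; omega
        rw [dif_pos h, if_neg hc, if_pos hlast, hdrop, hnil]
        simp [gSpec, hc]
      · have hj1 : j + 1 < cs.length := by omega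
        have hget : cs.getD (j+1) ' ' = cs[j+1] := List.getD_eq_getElem cs ' ' hj1
        have hhead : (cs.drop (j+1)).head? = some cs[j+1] := by
          rw [(List.getElem_cons_drop hj1).symm]; rfl
        rw [dif_pos h, if_neg hc, if_neg hlast, hget]
        by_cases hsh : cs[j+1] = '#'
        · rw [if_pos hsh, goDrop cs (j+1) (s ++ [PySem.Chars.lowerChar cs[j]]), hdrop]
          simp [gSpec, hc, hhead, hsh]
        · rw [if_neg hsh, goDrop cs (j+1) (s ++ [cs[j]]), hdrop]
          simp [gSpec, hc, hhead, hsh]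
  · rw [calMusicGo, dif_neg h]
    rw [List.drop_eq_nil_of_le (by omega)]
    simp [gSpec]
termination_by cs.length - j

-- ===== VERDICT (by name: the statement is the Claim_ definition above) =====
theorem calMusic_spec : Claim_equal_calMusic := by
  intro music _
  unfold Spec_calMusic calMusic calMusic_alt
  rw [List.foldl_reverse, altFold, goDrop]
  simp
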